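-- pv_equiv track=rewrite | github.com/lopesth/sp3ctrum | SP3CTRUM/tools/splitCPMDcart.py | selFrames
-- ===== SOURCE A (Python) =====
-- def selFrames(stepNumbers, allframes):
--     selectedFrames = {}
--     number = 1
--     for frame in list(allframes.values()):
--         if number in stepNumbers:
--             selectedFrames.update({number : frame})
--         number +=1
--     return selectedFrames
-- ===== SOURCE B (Python) =====
-- def selFrames(stepNumbers, allframes):
--     framesList = list(allframes.values())
--     return {n: framesList[n - 1]
--             for n in sorted(set(stepNumbers))
--             if 1 <= n <= len(framesList)}
-- ===== Notes on version B (the rewrite author's own statement) =====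
-- stated objective: faster
-- what changed: Instead of scanning every frame and testing its 1-based index for membership in stepNumbers, B iterates over sorted(set(stepNumbers)) and indexes directly into a list of the frames, guarding the range.
import Mathlib
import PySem

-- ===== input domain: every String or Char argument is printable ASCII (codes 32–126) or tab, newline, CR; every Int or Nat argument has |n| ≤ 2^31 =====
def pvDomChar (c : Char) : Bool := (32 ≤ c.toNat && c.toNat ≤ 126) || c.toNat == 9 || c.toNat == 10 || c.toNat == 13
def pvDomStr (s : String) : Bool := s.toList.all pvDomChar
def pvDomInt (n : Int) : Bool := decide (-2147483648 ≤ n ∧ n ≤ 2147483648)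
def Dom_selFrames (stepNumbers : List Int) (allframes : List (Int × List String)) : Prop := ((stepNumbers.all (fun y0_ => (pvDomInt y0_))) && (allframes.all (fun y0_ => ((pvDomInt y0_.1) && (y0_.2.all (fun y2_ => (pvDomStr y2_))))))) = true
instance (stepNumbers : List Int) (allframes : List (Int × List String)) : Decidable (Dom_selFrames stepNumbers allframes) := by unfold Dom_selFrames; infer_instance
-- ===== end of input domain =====

-- B iterates over sorted(set(stepNumbers)) with direct indexing into the frames list, instead of
-- scanning every frame and testing its 1-based counter for membership in stepNumbers (faster).

-- ===== PORT A =====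
def selFrames (stepNumbers : List Int) (allframes : List (Int × List String)) : List (Int × List String) :=
  -- selectedFrames = {}; number = 1; for frame in list(allframes.values()): …
  (((PySem.Dict.mk allframes).values).foldl
    (fun (st : PySem.Dict Int (List String) × Int) frame =>
      (if st.2 ∈ stepNumbers then st.1.update [(st.2, frame)] else st.1, st.2 + 1))
    (PySem.Dict.empty, 1)).1.items

-- ===== PORT B =====
def selFrames_alt (stepNumbers : List Int) (allframes : List (Int × List String)) : List (Int × List String) :=
  let framesList := (PySem.Dict.mk allframes).values
  -- {n: framesList[n-1] for n in sorted(set(stepNumbers)) if 1 <= n <= len(framesList)}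
  ((PySem.List.sorted (PySem.Set.ofList stepNumbers) (fun x => x) false).foldl
    (fun (d : PySem.Dict Int (List String)) n =>
      if 1 ≤ n ∧ n ≤ (framesList.length : Int) then
        d.insert n (PySem.List.pyGetD framesList (n - 1) [])
      else d)
    PySem.Dict.empty).items

-- ===== PRECONDITION & SPEC =====
def Spec_selFrames (stepNumbers : List Int) (allframes : List (Int × List String)) (out : List (Int × List String)) : Prop := out = selFrames_alt stepNumbers allframes
instance (stepNumbers : List Int) (allframes : List (Int × List String)) (out : List (Int × List String)) : Decidable (Spec_selFrames stepNumbers allframes out) := by unfold Spec_selFrames; infer_instance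

-- ===== CLAIM (what is proved, stated in full; the proofs are below) =====
def Claim_equal_selFrames : Prop := ∀ (stepNumbers : List Int) (allframes : List (Int × List String)), Dom_selFrames stepNumbers allframes → Spec_selFrames stepNumbers allframes (selFrames stepNumbers allframes)

-- ===== LEMMAS AND PROOFS =====

-- proof helper: the (1-based index, frame) pairs A's counter loop walks through
def pvEnumFrom (m : Int) : List (List String) → List (Int × List String)
  | [] => []
  | x :: xs => (m, x) :: pvEnumFrom (m + 1) xs

theorem pvFoldA (steps : List Int) (frames : List (List String)) :
    ∀ (m : Int) (sel : PySem.Dict Int (List String)),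
      (frames.foldl
        (fun (st : PySem.Dict Int (List String) × Int) frame =>
          (if st.2 ∈ steps then st.1.update [(st.2, frame)] else st.1, st.2 + 1))
        (sel, m)).1
      = (pvEnumFrom m frames).foldl
          (fun d p => if p.1 ∈ steps then d.insert p.1 p.2 else d) sel := by
  induction frames with
  | nil => intro m sel; rfl
  | cons x xs ih =>
    intro m sel
    simp only [List.foldl_cons, pvEnumFrom]
    rw [ih]
    have hupd : sel.update [(m, x)] = sel.insert m x := rfl
    rw [hupd]

theorem pvMemEnumFrom (frames : List (List String)) :
    ∀ (m : Int), 0 ≤ m → ∀ p ∈ pvEnumFrom m frames,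
      m ≤ p.1 ∧ p.1 < m + frames.length ∧ p.2 = frames.getD (p.1 - m).toNat [] := by
  induction frames with
  | nil => intro m _ p hp; simp [pvEnumFrom] at hp
  | cons x xs ih =>
    intro m hm p hp
    simp only [pvEnumFrom, List.mem_cons] at hp
    rcases hp with rfl | hp
    · refine ⟨le_refl m, by simp only [List.length_cons]; push_cast; omega, ?_⟩
      simp
    · obtain ⟨h1, h2, h3⟩ := ih (m + 1) (by omega) p hp
      refine ⟨by omega, by simp only [List.length_cons] at h2 ⊢; push_cast at h2 ⊢; omega, ?_⟩
      have : (p.1 - m).toNat = (p.1 - (m + 1)).toNat + 1 := by omega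
      simp [this, h3]

theorem pvMemFstEnumFrom (frames : List (List String)) :
    ∀ (m : Int) (n : Int), n ∈ (pvEnumFrom m frames).map Prod.fst ↔ m ≤ n ∧ n < m + frames.length := by
  induction frames with
  | nil => intro m n; simp [pvEnumFrom]
  | cons x xs ih =>
    intro m n
    simp only [pvEnumFrom, List.map_cons, List.mem_cons, ih]
    constructor
    · rintro (rfl | ⟨h1, h2⟩) <;> (simp only [List.length_cons]; push_cast; omega)
    · intro ⟨h1, h2⟩
      by_cases h : n = m
      · left; exact h
      · right; simp only [List.length_cons] at h2; push_cast at h2; omega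

theorem pvFstEnumFrom (frames : List (List String)) :
    ∀ (m : Int), ((pvEnumFrom m frames).map Prod.fst).Pairwise (· < ·) := by
  induction frames with
  | nil => intro m; simp [pvEnumFrom]
  | cons x xs ih =>
    intro m
    simp only [pvEnumFrom, List.map_cons, List.pairwise_cons]
    refine ⟨?_, ih (m + 1)⟩
    intro a ha
    have := (pvMemFstEnumFrom xs (m + 1) a).1 ha
    omega

-- ===== VERDICT (by name: the statement is the Claim_ definition above) =====
theorem pvListEqOfPairwiseLt (l₁ l₂ : List Int)
    (h₁ : l₁.Pairwise (· < ·)) (h₂ : l₂.Pairwise (· < ·))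
    (hmem : ∀ n, n ∈ l₁ ↔ n ∈ l₂) : l₁ = l₂ := by
  have nd₁ : l₁.Nodup := h₁.imp (fun h => ne_of_lt h)
  have nd₂ : l₂.Nodup := h₂.imp (fun h => ne_of_lt h)
  have hperm : l₁.Perm l₂ := (List.perm_ext_iff_of_nodup nd₁ nd₂).2 hmem
  have e₁ : PySem.List.sorted l₂ (fun x => x) false = l₁ :=
    PySem.List.sorted_eq_of_perm_of_pairwise_lt l₂ l₁ (fun x => x) hperm h₁
  have e₂ : PySem.List.sorted l₂ (fun x => x) false = l₂ :=
    PySem.List.sorted_eq_self_of_pairwise l₂ (fun x => x) (h₂.imp (fun h => le_of_lt h))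
  rw [← e₁, e₂]

theorem selFrames_spec : Claim_equal_selFrames := by
  intro steps allframes _
  unfold Spec_selFrames selFrames selFrames_alt
  simp only []
  set frames := (PySem.Dict.mk allframes).values with hf
  rw [pvFoldA]
  rw [PySem.List.foldl_ite_eq_foldl_filter (p := fun p : Int × List String => p.1 ∈ steps)
      (f := fun (d : PySem.Dict Int (List String)) p => d.insert p.1 p.2)]
  rw [PySem.List.foldl_ite_eq_foldl_filter
      (p := fun n : Int => 1 ≤ n ∧ n ≤ (frames.length : Int))
      (f := fun (d : PySem.Dict Int (List String)) n =>
        d.insert n (PySem.List.pyGetD frames (n - 1) []))]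
  set P1 := (pvEnumFrom 1 frames).filter (fun p => decide (p.1 ∈ steps)) with hP1
  set valid := (PySem.List.sorted (PySem.Set.ofList steps) (fun x => x) false).filter
      (fun n => decide (1 ≤ n ∧ n ≤ (frames.length : Int))) with hV
  -- fst lists are strictly increasing
  have hpw1 : (P1.map Prod.fst).Pairwise (· < ·) :=
    List.Pairwise.sublist (List.Sublist.map Prod.fst List.filter_sublist) (pvFstEnumFrom frames 1)
  have hpwS := PySem.List.sorted_ofList_pairwise_lt (xs := steps)
  have hpwV : valid.Pairwise (· < ·) := List.Pairwise.sublist List.filter_sublist hpwS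
  -- A's items
  have hA : (P1.foldl (fun d p => d.insert p.1 p.2) PySem.Dict.empty).items = P1 := by
    rw [PySem.Dict.items_foldl_insert_fresh P1 Prod.fst Prod.snd PySem.Dict.empty
        (fun a _ => PySem.Dict.contains_empty _)
        (hpw1.imp (fun h => ne_of_lt h))]
    simp [PySem.Dict.empty]
  -- B's items
  have hB : (valid.foldl (fun d n => d.insert n (PySem.List.pyGetD frames (n - 1) []))
      PySem.Dict.empty).items
      = valid.map (fun n => (n, PySem.List.pyGetD frames (n - 1) [])) := by
    rw [PySem.Dict.items_foldl_insert_fresh valid (fun n => n)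
        (fun n => PySem.List.pyGetD frames (n - 1) []) PySem.Dict.empty
        (fun a _ => PySem.Dict.contains_empty _)
        (by simpa using hpwV.imp (fun h => ne_of_lt h))]
    simp [PySem.Dict.empty]
  rw [hA, hB]
  -- indices agree
  have hidx : P1.map Prod.fst = valid := by
    apply pvListEqOfPairwiseLt _ _ hpw1 hpwV
    intro n
    constructor
    · intro hn
      obtain ⟨p, hp, rfl⟩ := List.mem_map.1 hn
      have hp' := List.mem_filter.1 hp
      have hr := (pvMemFstEnumFrom frames 1 p.1).1 (List.mem_map.2 ⟨p, hp'.1, rfl⟩)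
      rw [hV]
      refine List.mem_filter.2 ⟨?_, by simp; omega⟩
      rw [PySem.List.mem_sorted, PySem.Set.mem_ofList]
      simpa using hp'.2
    · intro hn
      rw [hV] at hn
      have hn' := List.mem_filter.1 hn
      have hns : n ∈ steps := by
        have := hn'.1; rwa [PySem.List.mem_sorted, PySem.Set.mem_ofList] at this
      have hrange : 1 ≤ n ∧ n ≤ (frames.length : Int) := by simpa using hn'.2
      obtain ⟨p, hp, hpn⟩ := List.mem_map.1
        ((pvMemFstEnumFrom frames 1 n).2 ⟨hrange.1, by omega⟩)
      exact List.mem_map.2 ⟨p, List.mem_filter.2 ⟨hp, by simp [hpn, hns]⟩, hpn⟩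
  -- each pair of P1 is rebuilt from its index
  have hpair : ∀ p ∈ P1, (p.1, PySem.List.pyGetD frames (p.1 - 1) []) = p := by
    intro p hp
    have hmem := List.mem_of_mem_filter hp
    obtain ⟨h1, h2, h3⟩ := pvMemEnumFrom frames 1 (by norm_num) p hmem
    have hc : p.1 - 1 = ((p.1 - 1).toNat : Int) := by omega
    rw [hc, PySem.List.pyGetD_natCast, ← h3]
  calc P1 = (P1.map Prod.fst).map (fun n => (n, PySem.List.pyGetD frames (n - 1) [])) := by
        rw [List.map_map]
        refine ((List.map_congr_left ?_).trans (List.map_id _)).symm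
        intro p hp
        exact hpair p hp
    _ = valid.map (fun n => (n, PySem.List.pyGetD frames (n - 1) [])) := by rw [hidx]
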